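-- pv_equiv track=rewrite | github.com/Applied-Machine-Learning-2021/final-project-viperlib-uk | server/VIPER.py | VIPER_COCO_priv_and_not
-- ===== SOURCE A (Python) =====
-- def VIPER_COCO_priv_or_not(class_num):
--   if class_num in [12, 14, 30, 33, 46, 63, 65, 66, 70, 71, 72, 73, 74, 75, 76, 77, 85, 110, 133,31,69,3]:
--     return True
--   else:
--     return False
--
-- def VIPER_COCO_priv_and_not(detected_classes_list):
--   num_private = 0
--   num_non_private = 0
--
--   for i in detected_classes_list:
--     if VIPER_COCO_priv_or_not(int(i)):
--       num_private += 1
--     else: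
--       num_non_private += 1
--   return num_private, num_non_private
-- ===== SOURCE B (Python) =====
-- PRIVATE_CLASSES = [12, 14, 30, 33, 46, 63, 65, 66, 70, 71, 72, 73, 74, 75, 76, 77, 85, 110, 133, 31, 69, 3]
--
-- def VIPER_COCO_priv_and_not(detected_classes_list):
--     vals = [int(i) for i in detected_classes_list]
--     num_private = sum(vals.count(p) for p in PRIVATE_CLASSES)
--     return num_private, len(vals) - num_private
-- ===== Notes on version B (the rewrite author's own statement) =====
-- stated objective: alternative
-- what changed: B inverts the loop structure: instead of A's single element loop testing each element against the private list, B materializes the int values once and then iterates over the 22 private class ids, summing vals.count(p) for each, deriving the non-private count by subtraction; correctness rests on the private ids being pairwise distinct.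
import Mathlib
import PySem

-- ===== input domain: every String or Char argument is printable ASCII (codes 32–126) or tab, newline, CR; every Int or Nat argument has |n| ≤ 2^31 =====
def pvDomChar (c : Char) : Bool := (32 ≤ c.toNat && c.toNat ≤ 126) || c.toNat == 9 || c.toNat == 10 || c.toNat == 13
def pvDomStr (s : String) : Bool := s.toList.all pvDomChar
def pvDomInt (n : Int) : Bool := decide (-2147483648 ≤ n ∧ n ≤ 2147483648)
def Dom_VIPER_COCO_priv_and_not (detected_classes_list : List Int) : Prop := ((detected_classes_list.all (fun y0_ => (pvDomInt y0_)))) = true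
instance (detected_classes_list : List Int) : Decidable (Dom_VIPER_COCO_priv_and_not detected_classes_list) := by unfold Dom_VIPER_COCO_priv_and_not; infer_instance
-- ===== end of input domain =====

-- B inverts the loops: it iterates over the 22 private class ids, counting each one's occurrences
-- in the input, instead of A's element loop with two counters (alternative decomposition; same values).
-- ===== PORT A =====
def VIPER_COCO_priv_or_not (class_num : Int) : Bool :=
  ([12, 14, 30, 33, 46, 63, 65, 66, 70, 71, 72, 73, 74, 75, 76, 77, 85, 110, 133, 31, 69, 3] : List Int).contains class_num

def VIPER_COCO_priv_and_not (detected_classes_list : List Int) : Int × Int :=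
  let s := detected_classes_list.foldl
    (fun (s : Int × Int) i =>
      if VIPER_COCO_priv_or_not i then (s.1 + 1, s.2) else (s.1, s.2 + 1))
    (0, 0)
  (s.1, s.2)

-- ===== PORT B =====
def pvPrivateClasses : List Int :=
  [12, 14, 30, 33, 46, 63, 65, 66, 70, 71, 72, 73, 74, 75, 76, 77, 85, 110, 133, 31, 69, 3]

def VIPER_COCO_priv_and_not_alt (detected_classes_list : List Int) : Int × Int :=
  let vals := detected_classes_list.map (fun i => i)  -- int(i) is the identity on Int
  let num_private : Int := ((pvPrivateClasses.map (fun p => vals.count p)).sum : Nat)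
  (num_private, (vals.length : Int) - num_private)

-- ===== PRECONDITION & SPEC =====
def Spec_VIPER_COCO_priv_and_not (detected_classes_list : List Int) (out : Int × Int) : Prop := out = VIPER_COCO_priv_and_not_alt detected_classes_list
instance (detected_classes_list : List Int) (out : Int × Int) : Decidable (Spec_VIPER_COCO_priv_and_not detected_classes_list out) := by unfold Spec_VIPER_COCO_priv_and_not; infer_instance

-- ===== CLAIM (what is proved, stated in full; the proofs are below) =====
def Claim_equal_VIPER_COCO_priv_and_not : Prop := ∀ (detected_classes_list : List Int), Dom_VIPER_COCO_priv_and_not detected_classes_list → Spec_VIPER_COCO_priv_and_not detected_classes_list (VIPER_COCO_priv_and_not detected_classes_list)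

-- ===== LEMMAS AND PROOFS =====
theorem pv_foldl_counts (l : List Int) (a b : Int) :
    l.foldl (fun (s : Int × Int) i =>
      if VIPER_COCO_priv_or_not i then (s.1 + 1, s.2) else (s.1, s.2 + 1)) (a, b)
    = (a + (l.countP (fun i => VIPER_COCO_priv_or_not i) : Nat),
       b + ((l.length - l.countP (fun i => VIPER_COCO_priv_or_not i) : Nat) : Int)) := by
  induction l generalizing a b with
  | nil => simp
  | cons x xs ih =>
    simp only [List.foldl_cons, List.countP_cons, List.length_cons]
    by_cases h : VIPER_COCO_priv_or_not x
    · rw [if_pos h, ih]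
      have hle := List.countP_le_length (l := xs) (p := fun i => VIPER_COCO_priv_or_not i)
      simp [h]; omega
    · rw [if_neg h, ih]
      have hle := List.countP_le_length (l := xs) (p := fun i => VIPER_COCO_priv_or_not i)
      simp [h]; omega

theorem pv_count_priv (x : Int) :
    pvPrivateClasses.count x = if VIPER_COCO_priv_or_not x then 1 else 0 := by
  by_cases h : VIPER_COCO_priv_or_not x
  · rw [if_pos h]
    have hm : x ∈ pvPrivateClasses := by
      simpa [VIPER_COCO_priv_or_not, pvPrivateClasses] using h
    exact List.count_eq_one_of_mem (by decide) hm
  · rw [if_neg h]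
    refine List.count_eq_zero.mpr ?_
    simpa [VIPER_COCO_priv_or_not, pvPrivateClasses] using h

theorem pv_sum_split (q : List Int) (x : Int) (f : Int → Nat) :
    (q.map (fun p => f p + if x == p then 1 else 0)).sum
      = (q.map f).sum + q.count x := by
  induction q with
  | nil => simp
  | cons a q ih =>
    rw [List.map_cons, List.sum_cons, ih, List.map_cons, List.sum_cons, List.count_cons]
    by_cases h : x = a
    · subst h; omega
    · simp [h, Ne.symm h]; omega

theorem pv_sum_counts (l : List Int) :
    (pvPrivateClasses.map (fun p => l.count p)).sum
      = l.countP (fun i => VIPER_COCO_priv_or_not i) := by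
  induction l with
  | nil => simp
  | cons x xs ih =>
    have hstep := pv_sum_split pvPrivateClasses x (fun p => xs.count p)
    simp only [List.count_cons] at hstep ⊢
    rw [hstep, ih, List.countP_cons, pv_count_priv]

-- ===== VERDICT (by name: the statement is the Claim_ definition above) =====
theorem VIPER_COCO_priv_and_not_spec : Claim_equal_VIPER_COCO_priv_and_not := by
  intro l _
  unfold Spec_VIPER_COCO_priv_and_not
  unfold VIPER_COCO_priv_and_not VIPER_COCO_priv_and_not_alt
  rw [pv_foldl_counts]
  have hle := List.countP_le_length (l := l) (p := fun i => VIPER_COCO_priv_or_not i)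
  simp only [List.map_id']
  rw [pv_sum_counts]
  rw [Prod.ext_iff]
  constructor
  · simp
  · simp; push_cast [hle]; omega
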